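-- pv_equiv track=rewrite | github.com/Hyperkit-Labs/hyperagent | services/orchestrator/nodes.py | _has_echidna_harness
-- ===== SOURCE A (Python) =====
-- def _has_echidna_harness(test_files: dict) -> bool:
--     """True if test files contain Echidna invariants or assertion-heavy properties.
--     Echidna is not considered successful unless executable properties exist."""
--     if not test_files or not isinstance(test_files, dict):
--         return False
--     combined = " ".join(
--         str(v) for v in test_files.values() if isinstance(v, str)
--     ).lower()
--     return (
--         "invariant_" in combined
--         or "echidna" in combined
--         or ("assert(" in combined and "test" in combined)
--     )
-- ===== SOURCE B (Python) =====
-- def _has_echidna_harness(test_files: dict) -> bool: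
--     """True if test files contain Echidna invariants or assertion-heavy properties.
--     Single pass over the values with global flags; no joined string is built."""
--     if not test_files or not isinstance(test_files, dict):
--         return False
--     has_assert = False
--     has_test = False
--     for v in test_files.values():
--         if not isinstance(v, str):
--             continue
--         lv = v.lower()
--         if "invariant_" in lv or "echidna" in lv:
--             return True
--         if "assert(" in lv:
--             has_assert = True
--         if "test" in lv:
--             has_test = True
--     return has_assert and has_test
-- ===== Notes on version B (the rewrite author's own statement) =====
-- stated objective: alternative
-- what changed: Replaces the join-everything-then-scan-four-times approach with a single pass over the values that keeps global assert/test flags and returns True early on the first invariant_/echidna hit; no combined string is ever built.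
import Mathlib
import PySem

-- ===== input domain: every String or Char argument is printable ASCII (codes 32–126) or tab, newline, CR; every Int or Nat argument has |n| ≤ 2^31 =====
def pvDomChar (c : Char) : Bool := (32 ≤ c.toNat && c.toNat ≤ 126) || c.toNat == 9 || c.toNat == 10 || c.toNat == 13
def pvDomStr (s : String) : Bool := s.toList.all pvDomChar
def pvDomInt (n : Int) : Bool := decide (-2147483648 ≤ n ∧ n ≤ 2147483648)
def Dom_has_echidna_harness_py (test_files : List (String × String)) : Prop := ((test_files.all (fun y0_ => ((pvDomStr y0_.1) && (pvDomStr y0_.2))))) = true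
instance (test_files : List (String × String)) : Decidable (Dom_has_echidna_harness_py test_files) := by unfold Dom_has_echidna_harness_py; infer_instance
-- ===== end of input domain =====

-- B drops the join: one pass over the dict values with global assert/test flags and an
-- early return on the first invariant_/echidna hit (alternative decomposition, same cost).

-- ===== PORT A =====
-- A: guard on empty dict, join all (str) values with " ", lowercase, scan the combined string.
def has_echidna_harness_py (test_files : List (String × String)) : Bool :=
  if test_files.isEmpty then false
  else
    let combined := PySem.Str.lower
      (PySem.Str.join " " ((PySem.Dict.ofList test_files).values))
    PySem.Str.isIn "invariant_" combined || PySem.Str.isIn "echidna" combined ||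
      (PySem.Str.isIn "assert(" combined && PySem.Str.isIn "test" combined)

-- ===== PORT B =====
-- B's loop: per-value lowercase, early True on invariant_/echidna, global assert/test flags.
def hasEchidnaGo : List String → Bool → Bool → Bool
  | [], has_assert, has_test => has_assert && has_test
  | v :: rest, has_assert, has_test =>
    let lv := PySem.Str.lower v
    if PySem.Str.isIn "invariant_" lv || PySem.Str.isIn "echidna" lv then true
    else hasEchidnaGo rest (has_assert || PySem.Str.isIn "assert(" lv)
                           (has_test || PySem.Str.isIn "test" lv)

def has_echidna_harness_py_alt (test_files : List (String × String)) : Bool :=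
  if test_files.isEmpty then false
  else hasEchidnaGo ((PySem.Dict.ofList test_files).values) false false

-- ===== PRECONDITION & SPEC =====
def Spec_has_echidna_harness_py (test_files : List (String × String)) (out : Bool) : Prop := out = has_echidna_harness_py_alt test_files
instance (test_files : List (String × String)) (out : Bool) : Decidable (Spec_has_echidna_harness_py test_files out) := by unfold Spec_has_echidna_harness_py; infer_instance

-- ===== CLAIM (what is proved, stated in full; the proofs are below) =====
def Claim_equal_has_echidna_harness_py : Prop := ∀ (test_files : List (String × String)), Dom_has_echidna_harness_py test_files → Spec_has_echidna_harness_py test_files (has_echidna_harness_py test_files)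

-- ===== LEMMAS AND PROOFS =====

-- a space-free pattern cannot straddle the " " separator
lemma infix_split_space (sub p t : List Char) (h : ' ' ∉ sub)
    (hin : sub <:+: (p ++ ' ' :: t)) : sub <:+: p ∨ sub <:+: t := by
  obtain ⟨s, e, heq⟩ := hin
  by_cases h1 : s.length + sub.length ≤ p.length
  · left
    have hsp : s.length ≤ p.length := by omega
    have hdrop : sub ++ e = p.drop s.length ++ ' ' :: t := by
      have := congrArg (List.drop s.length) heq
      simpa [List.drop_append_of_le_length hsp, List.drop_left] using this
    have hpre : sub <+: p.drop s.length := by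
      apply List.prefix_of_prefix_length_le
        (l₃ := p.drop s.length ++ ' ' :: t)
      · exact hdrop ▸ List.prefix_append sub e
      · exact List.prefix_append _ _
      · simp only [List.length_drop]; omega
    exact hpre.isInfix.trans (List.drop_suffix _ _).isInfix
  · by_cases h2 : p.length + 1 ≤ s.length
    · right
      have h3 : s ++ sub ++ e = (p ++ [' ']) ++ t := by simpa using heq
      have h4 := congrArg (List.drop (p.length + 1)) h3
      rw [show s ++ sub ++ e = (s ++ sub) ++ e by simp,
          List.drop_append_of_le_length (show p.length + 1 ≤ (s ++ sub).length by
            simp only [List.length_append]; omega),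
          List.drop_append_of_le_length h2,
          List.drop_left' (show (p ++ [' ']).length = p.length + 1 by simp)] at h4
      exact ⟨s.drop (p.length + 1), e, by simpa using h4⟩
    · exfalso
      have hs : s.length ≤ p.length := by omega
      have hlt : p.length - s.length < sub.length := by omega
      have hmem : sub[p.length - s.length]'hlt ∈ sub := List.getElem_mem _
      have hget : (s ++ (sub ++ e))[p.length]? = some (sub[p.length - s.length]'hlt) := by
        rw [List.getElem?_append_right hs, List.getElem?_append_left hlt]
        simp
      have hget' : (p ++ ' ' :: t)[p.length]? = some ' ' := by
        rw [List.getElem?_append_right (le_refl _)]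
        simp
      rw [show s ++ sub ++ e = s ++ (sub ++ e) by simp] at heq
      rw [heq] at hget
      rw [hget'] at hget
      rw [← Option.some.inj hget] at hmem
      exact h hmem

lemma lower_join (ls : List (List Char)) :
    PySem.Chars.lower (PySem.Chars.join [' '] ls)
      = PySem.Chars.join [' '] (ls.map PySem.Chars.lower) := by
  induction ls with
  | nil => simp [PySem.Chars.join_nil, PySem.Chars.lower]
  | cons l rest ih =>
    cases rest with
    | nil => simp [PySem.Chars.join_singleton]
    | cons l' r =>
      rw [PySem.Chars.join_cons_cons, List.map_cons, List.map_cons,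
          PySem.Chars.join_cons_cons, ← List.map_cons, ← ih]
      simp [PySem.Chars.lower, PySem.Chars.lowerChar]
      decide

lemma isIn_join_chars (sub : List Char) (h : ' ' ∉ sub) (hne : sub ≠ [])
    (ls : List (List Char)) :
    PySem.Chars.isIn sub (PySem.Chars.join [' '] ls)
      = ls.any (fun l => PySem.Chars.isIn sub l) := by
  induction ls with
  | nil =>
    rw [PySem.Chars.join_nil]
    simp only [List.any_nil]
    rw [PySem.Chars.isIn_eq_false_iff]
    intro hc
    exact hne (List.eq_nil_of_infix_nil hc)
  | cons l rest ih =>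
    cases rest with
    | nil => simp [PySem.Chars.join_singleton]
    | cons l' r =>
      rw [PySem.Chars.join_cons_cons]
      rw [List.any_cons, ← ih]
      rcases hb : PySem.Chars.isIn sub (l ++ [' '] ++ PySem.Chars.join [' '] (l' :: r)) with _ | _
      · rw [PySem.Chars.isIn_eq_false_iff] at hb
        symm
        rw [Bool.or_eq_false_iff]
        constructor
        · rw [PySem.Chars.isIn_eq_false_iff]
          intro hc
          exact hb (hc.trans ⟨[], [' '] ++ PySem.Chars.join [' '] (l' :: r), by simp⟩)
        · rw [PySem.Chars.isIn_eq_false_iff]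
          intro hc
          exact hb (hc.trans ⟨l ++ [' '], [], by simp⟩)
      · rw [PySem.Chars.isIn_iff_infix] at hb
        have := infix_split_space sub l _ h (by simpa using hb)
        symm
        rw [Bool.or_eq_true_iff]
        rcases this with hc | hc
        · left; rw [PySem.Chars.isIn_iff_infix]; exact hc
        · right; rw [PySem.Chars.isIn_iff_infix]; exact hc

-- Str-level: a space-free nonempty needle is in the lowered join iff it is in some lowered value
lemma isIn_lower_join (sub : String) (h : ' ' ∉ sub.toList) (hne : sub.toList ≠ [])
    (vals : List String) :
    PySem.Str.isIn sub (PySem.Str.lower (PySem.Str.join " " vals))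
      = vals.any (fun v => PySem.Str.isIn sub (PySem.Str.lower v)) := by
  have : ∀ v : String, PySem.Str.isIn sub (PySem.Str.lower v)
      = PySem.Chars.isIn sub.toList (PySem.Chars.lower v.toList) := by
    intro v; simp [pysem]
  simp only [this]
  rw [PySem.Str.toList_join]
  have hsep : (" " : String).toList = [' '] := rfl
  rw [hsep, lower_join, isIn_join_chars sub.toList h hne]
  simp [List.any_map, Function.comp_def]

lemma hasEchidnaGo_eq (vals : List String) (ha ht : Bool) :
    hasEchidnaGo vals ha ht
      = ((vals.any fun v => PySem.Str.isIn "invariant_" (PySem.Str.lower v))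
        || (vals.any fun v => PySem.Str.isIn "echidna" (PySem.Str.lower v))
        || ((ha || vals.any fun v => PySem.Str.isIn "assert(" (PySem.Str.lower v))
            && (ht || vals.any fun v => PySem.Str.isIn "test" (PySem.Str.lower v)))) := by
  induction vals generalizing ha ht with
  | nil => simp [hasEchidnaGo]
  | cons v rest ih =>
    simp only [hasEchidnaGo, List.any_cons]
    split
    next hc =>
      rcases Bool.or_eq_true_iff.mp hc with h1 | h1 <;> rw [h1] <;> simp
    next hc =>
      rw [ih]
      rw [Bool.or_eq_true_iff] at hc
      push Not at hc
      simp only [Bool.not_eq_true] at hc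
      rw [hc.1, hc.2]
      simp only [Bool.false_or, Bool.or_assoc]

-- ===== VERDICT (by name: the statement is the Claim_ definition above) =====
theorem has_echidna_harness_py_spec : Claim_equal_has_echidna_harness_py := by
  intro tf _
  unfold Spec_has_echidna_harness_py has_echidna_harness_py has_echidna_harness_py_alt
  rcases he : tf.isEmpty with _ | _
  · simp only [if_neg Bool.false_ne_true]
    rw [hasEchidnaGo_eq]
    rw [isIn_lower_join "invariant_" (by decide) (by decide),
        isIn_lower_join "echidna" (by decide) (by decide),
        isIn_lower_join "assert(" (by decide) (by decide),
        isIn_lower_join "test" (by decide) (by decide)]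
    simp
  · simp
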